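-- pv_equiv track=rewrite | github.com/Arsen1302/Code-copy-detector | TestData/solutions/problem_1325_3.py | solution_1325_3
-- ===== SOURCE A (Python) =====
-- from typing import List
--
-- def solution_1325_3(segments: List[List[int]]) -> List[List[int]]:
--     vals = []
--     for start, end, color in segments:
--         vals.append((start, +color))
--         vals.append((end, -color))
--
--     ans = []
--     prefix = prev = 0
--     for x, c in sorted(vals):
--         if prev < x and prefix: ans.append([prev, x, prefix])
--         prev = x
--         prefix += c
--     return ans
-- ===== SOURCE B (Python) =====
-- from typing import List
--
-- def solution_1325_3(segments: List[List[int]]) -> List[List[int]]: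
--     # Interval-stabbing brute force: cut the line at every endpoint, then for each
--     # elementary gap sum the signed coverage of all segments directly (no sweep state).
--     coords = sorted({x for s, e, _ in segments for x in (s, e)})
--     ans = []
--     for lo, hi in zip(coords, coords[1:]):
--         total = sum(c * ((s <= lo) - (e <= lo)) for s, e, c in segments)
--         if total:
--             ans.append([lo, hi, total])
--     return ans
-- ===== Notes on version B (the rewrite author's own statement) =====
-- stated objective: alternative
-- what changed: Replaces the sorted-event sweep with running prefix state by an interval-stabbing brute force: sort the distinct endpoints once, then for each elementary gap recompute the total color directly as a signed-indicator sum over all segments, with no running accumulator or event deltas.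
import Mathlib
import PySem

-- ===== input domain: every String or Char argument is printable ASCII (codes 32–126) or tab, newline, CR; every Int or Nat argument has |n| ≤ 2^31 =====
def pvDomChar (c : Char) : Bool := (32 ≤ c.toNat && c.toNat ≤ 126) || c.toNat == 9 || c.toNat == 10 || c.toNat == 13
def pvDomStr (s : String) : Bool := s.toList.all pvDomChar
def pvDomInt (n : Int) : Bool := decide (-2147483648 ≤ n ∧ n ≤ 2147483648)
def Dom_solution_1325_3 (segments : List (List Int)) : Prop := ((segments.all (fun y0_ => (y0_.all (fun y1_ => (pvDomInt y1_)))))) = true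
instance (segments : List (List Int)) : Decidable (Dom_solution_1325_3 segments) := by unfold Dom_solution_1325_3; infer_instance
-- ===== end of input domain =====

-- B replaces A's sorted-event sweep with running prefix state by an interval-stabbing
-- brute force: sort the distinct endpoints, then recompute each gap's total color
-- directly as a signed-indicator sum over all segments (alternative algorithm, O(n^2)).

-- ===== PORT A =====
-- the sweep step of A's second loop: state is (ans, prefix, prev)
def pvStepA (st : List (List Int) × Int × Int) (xc : Int × Int) : List (List Int) × Int × Int :=
  (if st.2.2 < xc.1 ∧ st.2.1 ≠ 0 then st.1 ++ [[st.2.2, xc.1, st.2.1]] else st.1,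
   st.2.1 + xc.2, xc.1)

-- A's first loop building vals (rows not of length 3 are unreachable under Pre_: Python raises there)
def pvVals (segments : List (List Int)) : List (Int × Int) :=
  segments.foldl (fun vals seg =>
    match seg with
    | [s, e, c] => vals ++ [(s, c), (e, -c)]
    | _ => vals) []

def solution_1325_3 (segments : List (List Int)) : List (List Int) :=
  ((PySem.List.sorted2 (pvVals segments) (fun p => p.1) (fun p => p.2)).foldl pvStepA ([], 0, 0)).1

-- ===== PORT B =====
-- the elements of B's set comprehension {x for s, e, _ in segments for x in (s, e)}
def pvCoordsList (segments : List (List Int)) : List Int :=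
  segments.foldl (fun acc seg =>
    match seg with
    | [s, e, _] => acc ++ [s, e]
    | _ => acc) []

-- B's per-gap total: sum(c * ((s <= lo) - (e <= lo)) for s, e, c in segments)
def pvTotal (segments : List (List Int)) (lo : Int) : Int :=
  segments.foldl (fun acc seg =>
    match seg with
    | [s, e, c] => acc + c * ((if s ≤ lo then (1 : Int) else 0) - (if e ≤ lo then (1 : Int) else 0))
    | _ => acc) 0

def solution_1325_3_alt (segments : List (List Int)) : List (List Int) :=
  let coords := PySem.List.sorted (PySem.Set.ofList (pvCoordsList segments)) (fun x => x)
  (List.zip coords (PySem.List.slice coords (some 1) none)).foldl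
    (fun ans q => if pvTotal segments q.1 ≠ 0 then ans ++ [[q.1, q.2, pvTotal segments q.1]] else ans) []

-- ===== PRECONDITION & SPEC =====
-- Pre_ excludes rows whose length is not 3: Python A (and B) raise ValueError unpacking them.
def Pre_solution_1325_3 (segments : List (List Int)) : Prop :=
  ∀ seg ∈ segments, seg.length = 3
instance (segments : List (List Int)) : Decidable (Pre_solution_1325_3 segments) := by unfold Pre_solution_1325_3; infer_instance
def pvWitness_solution_1325_3 : List (List Int) := [[0, 2, 3], [1, 4, 2]]

def Spec_solution_1325_3 (segments : List (List Int)) (out : List (List Int)) : Prop := out = solution_1325_3_alt segments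
instance (segments : List (List Int)) (out : List (List Int)) : Decidable (Spec_solution_1325_3 segments out) := by unfold Spec_solution_1325_3; infer_instance

-- ===== CLAIM (what is proved, stated in full; the proofs are below) =====
def Claim_equal_solution_1325_3 : Prop := ∀ (segments : List (List Int)), Dom_solution_1325_3 segments → Pre_solution_1325_3 segments → Spec_solution_1325_3 segments (solution_1325_3 segments)

-- ===== LEMMAS AND PROOFS =====

-- events of one segment row
def pvEvs (seg : List Int) : List (Int × Int) :=
  match seg with
  | [s, e, c] => [(s, c), (e, -c)]
  | _ => []

-- the signed coverage at lo, summed over a raw event list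
def pvT (E : List (Int × Int)) (lo : Int) : Int :=
  (E.map (fun p => if p.1 ≤ lo then p.2 else 0)).sum

-- the total delta at one coordinate, summed over a raw event list
def pvD (E : List (Int × Int)) (k : Int) : Int :=
  (E.map (fun p => if p.1 = k then p.2 else 0)).sum

lemma pvVals_eq_flatMap (segments : List (List Int)) :
    pvVals segments = segments.flatMap pvEvs := by
  suffices h : ∀ acc, segments.foldl (fun vals seg =>
      match seg with
      | [s, e, c] => vals ++ [(s, c), (e, -c)]
      | _ => vals) acc = acc ++ segments.flatMap pvEvs by
    simpa [pvVals] using h []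
  induction segments with
  | nil => intro acc; simp
  | cons seg rest ih =>
    intro acc
    match seg with
    | [] => simp [pvEvs, ih]
    | [a] => simp [pvEvs, ih]
    | [a, b] => simp [pvEvs, ih]
    | [a, b, c] => simp [pvEvs, ih]
    | a :: b :: c :: d :: t => simp [pvEvs, ih]

lemma pvCoordsList_eq (segments : List (List Int)) :
    pvCoordsList segments = (segments.flatMap pvEvs).map (fun p => p.1) := by
  suffices h : ∀ acc, segments.foldl (fun acc seg =>
      match seg with
      | [s, e, _] => acc ++ [s, e]
      | _ => acc) acc = acc ++ (segments.flatMap pvEvs).map (fun p => p.1) by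
    simpa [pvCoordsList] using h []
  induction segments with
  | nil => intro acc; simp
  | cons seg rest ih =>
    intro acc
    match seg with
    | [] => simp [pvEvs, ih]
    | [a] => simp [pvEvs, ih]
    | [a, b] => simp [pvEvs, ih]
    | [a, b, c] => simp [pvEvs, ih]
    | a :: b :: c :: d :: t => simp [pvEvs, ih]

lemma pvTotal_eq (segments : List (List Int)) (lo : Int) :
    pvTotal segments lo = pvT (segments.flatMap pvEvs) lo := by
  suffices h : ∀ acc, segments.foldl (fun acc seg =>
      match seg with
      | [s, e, c] => acc + c * ((if s ≤ lo then (1 : Int) else 0) - (if e ≤ lo then (1 : Int) else 0))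
      | _ => acc) acc = acc + pvT (segments.flatMap pvEvs) lo by
    simpa [pvTotal] using h 0
  induction segments with
  | nil => intro acc; simp [pvT]
  | cons seg rest ih =>
    intro acc
    match seg with
    | [] => simp [pvEvs, pvT, ih]
    | [a] => simp [pvEvs, pvT, ih]
    | [a, b] => simp [pvEvs, pvT, ih]
    | [a, b, c] =>
      simp only [List.foldl_cons, List.flatMap_cons, pvEvs, ih, pvT, List.map_append,
        List.sum_append, List.map_cons, List.sum_cons, List.map_nil, List.sum_nil]
      split_ifs <;> ring
    | a :: b :: c :: d :: t => simp [pvEvs, pvT, ih]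

-- the comparison sorted2 uses (Python's lexicographic tuple '<')
def pvLt (a b : Int × Int) : Bool :=
  decide (a.1 < b.1) || (!decide (b.1 < a.1) && decide (a.2 < b.2))

lemma pairwise_insertBy_fst (x : Int × Int) (l : List (Int × Int))
    (h : l.Pairwise (fun a b => a.1 ≤ b.1)) :
    (PySem.List.insertBy pvLt x l).Pairwise (fun a b => a.1 ≤ b.1) := by
  induction l with
  | nil => simp [PySem.List.insertBy]
  | cons y ys ih =>
    rw [PySem.List.insertBy]
    by_cases hxy : pvLt x y = true
    · rw [if_pos hxy]
      have h1 : x.1 ≤ y.1 := by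
        simp [pvLt] at hxy
        omega
      constructor
      · intro z hz
        rcases List.mem_cons.mp hz with hz | hz
        · exact hz ▸ h1
        · exact le_trans h1 (List.rel_of_pairwise_cons h hz)
      · exact h
    · rw [if_neg hxy]
      constructor
      · intro w hw
        rcases (PySem.List.mem_insertBy pvLt x w ys).mp hw with hw | hw
        · subst hw
          simp [pvLt] at hxy
          omega
        · exact List.rel_of_pairwise_cons h hw
      · exact ih h.tail

lemma pairwise_foldl_insertBy_fst (l : List (Int × Int)) (acc : List (Int × Int))
    (h : acc.Pairwise (fun a b => a.1 ≤ b.1)) :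
    (l.foldl (fun acc x => PySem.List.insertBy pvLt x acc) acc).Pairwise (fun a b => a.1 ≤ b.1) := by
  induction l generalizing acc with
  | nil => exact h
  | cons x xs ih => exact ih _ (pairwise_insertBy_fst x acc h)

lemma pairwise_sorted2_fst (l : List (Int × Int)) :
    (PySem.List.sorted2 l (fun p => p.1) (fun p => p.2)).Pairwise (fun a b => a.1 ≤ b.1) := by
  have hrfl : PySem.List.sorted2 l (fun p => p.1) (fun p => p.2) =
      l.foldl (fun acc x => PySem.List.insertBy pvLt x acc) [] := rfl
  rw [hrfl]
  exact pairwise_foldl_insertBy_fst l [] (by simp)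

lemma split_filter_min (k : Int) (L : List (Int × Int))
    (hp : L.Pairwise (fun a b => a.1 ≤ b.1)) (hge : ∀ e ∈ L, k ≤ e.1) :
    L = L.filter (fun e => e.1 == k) ++ L.filter (fun e => !(e.1 == k)) := by
  induction L with
  | nil => simp
  | cons e L' ih =>
    by_cases he : e.1 = k
    · simp only [List.filter_cons, he, beq_self_eq_true, if_pos, Bool.not_true]
      simp only [List.cons_append]
      exact congrArg (e :: ·) (ih hp.tail (fun z hz => hge z (List.mem_cons_of_mem e hz)))
    · have hlt : k < e.1 := lt_of_le_of_ne (hge e (List.mem_cons_self)) (fun h => he h.symm)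
      have hall : ∀ z ∈ e :: L', ¬(z.1 == k) = true := by
        intro z hz
        rcases List.mem_cons.mp hz with hz | hz
        · simp [hz, he]
        · have := List.rel_of_pairwise_cons hp hz
          simp
          omega
      rw [List.filter_eq_nil_iff.mpr hall, List.nil_append]
      rw [List.filter_eq_self.mpr (fun z hz => by simpa using hall z hz)]

lemma flatMap_filter_decomp (K : List Int) (L : List (Int × Int))
    (hK : K.Pairwise (· < ·)) (hL : L.Pairwise (fun a b => a.1 ≤ b.1))
    (hmem : ∀ e ∈ L, e.1 ∈ K) :
    L = K.flatMap (fun k => L.filter (fun e => e.1 == k)) := by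
  induction K generalizing L with
  | nil =>
    cases L with
    | nil => rfl
    | cons e L' => exact absurd (hmem e List.mem_cons_self) (by simp)
  | cons k K' ih =>
    have hge : ∀ e ∈ L, k ≤ e.1 := by
      intro e he
      rcases List.mem_cons.mp (hmem e he) with h | h
      · exact le_of_eq h.symm
      · exact le_of_lt (List.rel_of_pairwise_cons hK h)
    have hsplit := split_filter_min k L hL hge
    have hrest_pair : (L.filter (fun e => !(e.1 == k))).Pairwise (fun a b => a.1 ≤ b.1) :=
      hL.sublist (List.filter_sublist)
    have hrest_mem : ∀ e ∈ L.filter (fun e => !(e.1 == k)), e.1 ∈ K' := by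
      intro e he
      have h1 := List.mem_filter.mp he
      rcases List.mem_cons.mp (hmem e h1.1) with h | h
      · exact absurd h (by simpa using h1.2)
      · exact h
    have hIH := ih (L.filter (fun e => !(e.1 == k))) hK.tail hrest_pair hrest_mem
    have hfk : ∀ k' ∈ K', (L.filter (fun e => !(e.1 == k))).filter (fun e => e.1 == k') =
        L.filter (fun e => e.1 == k') := by
      intro k' hk'
      have hkk' : k < k' := List.rel_of_pairwise_cons hK hk'
      rw [List.filter_filter]
      apply List.filter_congr
      intro e _
      by_cases h : e.1 = k'
      · simp [h]
        omega
      · simp [h]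
    calc L = L.filter (fun e => e.1 == k) ++ L.filter (fun e => !(e.1 == k)) := hsplit
      _ = L.filter (fun e => e.1 == k) ++
            K'.flatMap (fun k' => (L.filter (fun e => !(e.1 == k))).filter (fun e => e.1 == k')) := by
            rw [← hIH]
      _ = L.filter (fun e => e.1 == k) ++ K'.flatMap (fun k' => L.filter (fun e => e.1 == k')) := by
            congr 1
            exact List.flatMap_congr (fun k' hk' => hfk k' hk')
      _ = (k :: K').flatMap (fun k => L.filter (fun e => e.1 == k)) := by
            rw [List.flatMap_cons]

lemma foldl_stepA_same (k : Int) (G : List (Int × Int)) (hG : ∀ e ∈ G, e.1 = k)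
    (ans : List (List Int)) (p : Int) :
    G.foldl pvStepA (ans, p, k) = (ans, p + (G.map (·.2)).sum, k) := by
  induction G generalizing p with
  | nil => simp
  | cons e G' ih =>
    have he1 : e.1 = k := hG e List.mem_cons_self
    have hstep : pvStepA (ans, p, k) e = (ans, p + e.2, k) := by
      simp [pvStepA, he1]
    rw [List.foldl_cons, hstep, ih (fun z hz => hG z (List.mem_cons_of_mem e hz)) (p + e.2)]
    simp
    ring

lemma foldl_stepA_group (k : Int) (G : List (Int × Int)) (hne : G ≠ [])
    (hG : ∀ e ∈ G, e.1 = k) (st : List (List Int) × Int × Int) :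
    G.foldl pvStepA st =
      (if st.2.2 < k ∧ st.2.1 ≠ 0 then st.1 ++ [[st.2.2, k, st.2.1]] else st.1,
       st.2.1 + (G.map (·.2)).sum, k) := by
  cases G with
  | nil => exact absurd rfl hne
  | cons e G' =>
    have he1 : e.1 = k := hG e List.mem_cons_self
    rw [List.foldl_cons]
    have hstep : pvStepA st e =
        ((if st.2.2 < k ∧ st.2.1 ≠ 0 then st.1 ++ [[st.2.2, k, st.2.1]] else st.1),
         st.2.1 + e.2, k) := by
      simp [pvStepA, he1]
    rw [hstep, foldl_stepA_same k G' (fun z hz => hG z (List.mem_cons_of_mem e hz))]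
    simp
    ring

-- A's sweep over the group of events at k, seen per coordinate: state is (ans, prefix, prev)
def pvStepK (E : List (Int × Int)) (st : List (List Int) × Int × Int) (k : Int) :
    List (List Int) × Int × Int :=
  (if st.2.2 < k ∧ st.2.1 ≠ 0 then st.1 ++ [[st.2.2, k, st.2.1]] else st.1,
   st.2.1 + pvD E k, k)

lemma foldl_flatMap_eq_foldl_keys (E : List (Int × Int)) (K : List Int)
    (g : Int → List (Int × Int))
    (h : ∀ k ∈ K, g k ≠ [] ∧ (∀ e ∈ g k, e.1 = k) ∧ ((g k).map (·.2)).sum = pvD E k)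
    (st : List (List Int) × Int × Int) :
    (K.flatMap g).foldl pvStepA st = K.foldl (pvStepK E) st := by
  induction K generalizing st with
  | nil => rfl
  | cons k K' ih =>
    obtain ⟨hne, hall, hsum⟩ := h k List.mem_cons_self
    rw [List.flatMap_cons, List.foldl_append, List.foldl_cons]
    rw [foldl_stepA_group k (g k) hne hall st, hsum]
    exact ih (fun k' hk' => h k' (List.mem_cons_of_mem k hk')) _

lemma sum_filter_eq_pvD (L : List (Int × Int)) (k : Int) :
    ((L.filter (fun p => p.1 == k)).map (·.2)).sum = pvD L k := by
  induction L with
  | nil => simp [pvD]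
  | cons p L' ih =>
    by_cases h : p.1 = k
    · simp [pvD, h] at ih ⊢
      omega
    · simp [pvD, h] at ih ⊢
      exact ih

lemma pvT_split (E : List (Int × Int)) (k0 k1 : Int) (h01 : k0 < k1)
    (h : ∀ p ∈ E, p.1 ≤ k1 → p.1 ≤ k0 ∨ p.1 = k1) :
    pvT E k1 = pvT E k0 + pvD E k1 := by
  induction E with
  | nil => simp [pvT, pvD]
  | cons p E' ih =>
    have hp := h p List.mem_cons_self
    have ih' := ih (fun q hq => h q (List.mem_cons_of_mem p hq))
    simp only [pvT, pvD, List.map_cons, List.sum_cons] at ih' ⊢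
    split_ifs <;> omega

lemma pvT_min (E : List (Int × Int)) (k0 : Int)
    (h : ∀ p ∈ E, p.1 ≤ k0 → p.1 = k0) :
    pvT E k0 = pvD E k0 := by
  induction E with
  | nil => simp [pvT, pvD]
  | cons p E' ih =>
    have hp := h p List.mem_cons_self
    have ih' := ih (fun q hq => h q (List.mem_cons_of_mem p hq))
    simp only [pvT, pvD, List.map_cons, List.sum_cons] at ih' ⊢
    split_ifs <;> omega

lemma sweep_main (E : List (Int × Int)) (K' : List Int) :
    ∀ (prev : Int) (ans : List (List Int)),
    K'.Pairwise (· < ·) → (∀ k ∈ K', prev < k) →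
    (∀ x ∈ E.map (fun p => p.1), x ≤ prev ∨ x ∈ K') →
    (K'.foldl (pvStepK E) (ans, pvT E prev, prev)).1 =
      (List.zip (prev :: K') K').foldl
        (fun a q => if pvT E q.1 ≠ 0 then a ++ [[q.1, q.2, pvT E q.1]] else a) ans := by
  induction K' with
  | nil => intro prev ans _ _ _; simp
  | cons k K'' ih =>
    intro prev ans hpair hgt hcov
    have hprevk : prev < k := hgt k List.mem_cons_self
    have hstep : pvStepK E (ans, pvT E prev, prev) k =
        ((if pvT E prev ≠ 0 then ans ++ [[prev, k, pvT E prev]] else ans),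
         pvT E prev + pvD E k, k) := by
      simp only [pvStepK]
      congr 1
      by_cases hz : pvT E prev ≠ 0
      · rw [if_pos ⟨hprevk, hz⟩, if_pos hz]
      · rw [if_neg (fun hc => hz hc.2), if_neg hz]
    have hsum : pvT E prev + pvD E k = pvT E k := by
      rw [← pvT_split E prev k hprevk]
      intro p hp hle
      rcases hcov p.1 (List.mem_map.mpr ⟨p, hp, rfl⟩) with h | h
      · exact Or.inl h
      · rcases List.mem_cons.mp h with h | h
        · exact Or.inr h
        · exact absurd hle (not_le.mpr (List.rel_of_pairwise_cons hpair h))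
    have hzip : List.zip (prev :: k :: K'') (k :: K'') =
        (prev, k) :: List.zip (k :: K'') K'' := rfl
    rw [List.foldl_cons, hstep, hsum, hzip, List.foldl_cons]
    exact ih k _ hpair.tail (fun k' hk' => List.rel_of_pairwise_cons hpair hk')
      (by
        intro x hx
        rcases hcov x hx with h | h
        · exact Or.inl (le_of_lt (lt_of_le_of_lt h hprevk))
        · rcases List.mem_cons.mp h with h | h
          · exact Or.inl (le_of_eq h)
          · exact Or.inr h)

-- ===== VERDICT (by name: the statement is the Claim_ definition above) =====
theorem solution_1325_3_spec : Claim_equal_solution_1325_3 := by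
  intro segments _ _
  unfold Spec_solution_1325_3 solution_1325_3 solution_1325_3_alt
  rw [pvVals_eq_flatMap, pvCoordsList_eq]
  set E := segments.flatMap pvEvs with hE
  set S := PySem.List.sorted2 E (fun p => p.1) (fun p => p.2) with hS
  set K := PySem.List.sorted (PySem.Set.ofList (E.map (fun p => p.1))) (fun x => x) with hK
  have hSperm : S.Perm E := PySem.List.sorted2_perm E _ _ false
  have hKpair : K.Pairwise (· < ·) := PySem.List.sorted_ofList_pairwise_lt _
  have hSpair : S.Pairwise (fun a b => a.1 ≤ b.1) := pairwise_sorted2_fst E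
  have hmemK : ∀ x : Int, x ∈ K ↔ x ∈ E.map (fun p => p.1) := by
    intro x
    rw [hK, PySem.List.mem_sorted, PySem.Set.mem_ofList]
  have hmem : ∀ e ∈ S, e.1 ∈ K := by
    intro e he
    exact (hmemK e.1).mpr (List.mem_map.mpr ⟨e, hSperm.mem_iff.mp he, rfl⟩)
  have hdecomp := flatMap_filter_decomp K S hKpair hSpair hmem
  have hgroups : ∀ k ∈ K, (S.filter (fun e => e.1 == k)) ≠ [] ∧
      (∀ e ∈ S.filter (fun e => e.1 == k), e.1 = k) ∧
      (((S.filter (fun e => e.1 == k)).map (·.2)).sum = pvD E k) := by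
    intro k hk
    obtain ⟨e, heE, he1⟩ := List.mem_map.mp ((hmemK k).mp hk)
    have heS : e ∈ S := hSperm.mem_iff.mpr heE
    refine ⟨List.ne_nil_of_mem (List.mem_filter.mpr ⟨heS, by simp [he1]⟩), ?_, ?_⟩
    · intro x hx
      exact by simpa using (List.mem_filter.mp hx).2
    · rw [sum_filter_eq_pvD]
      exact List.Perm.sum_eq (List.Perm.map _ hSperm)
  rw [hdecomp, foldl_flatMap_eq_foldl_keys E K _ hgroups]
  have hfun : (fun (ans : List (List Int)) (q : Int × Int) =>
      if pvTotal segments q.1 ≠ 0 then ans ++ [[q.1, q.2, pvTotal segments q.1]] else ans) =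
      (fun ans q => if pvT E q.1 ≠ 0 then ans ++ [[q.1, q.2, pvT E q.1]] else ans) := by
    funext ans q
    rw [pvTotal_eq, ← hE]
  rw [hfun]
  cases hKc : K with
  | nil => simp
  | cons k0 K' =>
    have hfirst : pvStepK E ([], 0, 0) k0 = ([], pvD E k0, k0) := by
      simp [pvStepK]
    have hmin : pvT E k0 = pvD E k0 := by
      apply pvT_min
      intro p hp hle
      have hpK : p.1 ∈ K := (hmemK p.1).mpr (List.mem_map.mpr ⟨p, hp, rfl⟩)
      rw [hKc] at hpK
      rcases List.mem_cons.mp hpK with h | h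
      · exact h
      · rw [hKc] at hKpair
        exact absurd hle (not_le.mpr (List.rel_of_pairwise_cons hKpair h))
    rw [hKc] at hKpair
    rw [List.foldl_cons, hfirst, ← hmin]
    simp only [PySem.List.slice_from_one, List.tail_cons]
    have hcov : ∀ x ∈ E.map (fun p => p.1), x ≤ k0 ∨ x ∈ K' := by
      intro x hx
      have : x ∈ K := (hmemK x).mpr hx
      rw [hKc] at this
      rcases List.mem_cons.mp this with h | h
      · exact Or.inl (le_of_eq h)
      · exact Or.inr h
    have := sweep_main E K' k0 [] hKpair.tail
      (fun k hk => List.rel_of_pairwise_cons hKpair hk) hcov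
    simpa using this
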